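-- pv_equiv track=rewrite | github.com/jayanthbabu3/resumewithjayanth | improve_pdf_matching.py | is_centered_header
-- ===== SOURCE A (Python) =====
-- def is_centered_header(ui_content):
--     """Check if header is centered"""
--     # Look for text-center near personalInfo.fullName
--     lines = ui_content.split('\n')
--     for i, line in enumerate(lines):
--         if 'personalInfo.fullName' in line:
--             # Check surrounding 10 lines for text-center
--             context = '\n'.join(lines[max(0, i-10):min(len(lines), i+10)])
--             if 'text-center' in context:
--                 return True
--     return False
-- ===== SOURCE B (Python) =====
-- def is_centered_header(ui_content):
--     """Check if header is centered"""
--     lines = ui_content.split('\n')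
--     # one pass: indices of all lines containing 'text-center'
--     centered = [j for j, line in enumerate(lines) if 'text-center' in line]
--     for i, line in enumerate(lines):
--         if 'personalInfo.fullName' in line:
--             if any(i - 10 <= j < i + 10 for j in centered):
--                 return True
--     return False
-- ===== Notes on version B (the rewrite author's own statement) =====
-- stated objective: alternative
-- what changed: Instead of re-building and re-scanning a joined 20-line context string for every marker line, B precomputes the index list of centered lines in one pass and answers each marker with an integer proximity check i-10 <= j < i+10.
import Mathlib
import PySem

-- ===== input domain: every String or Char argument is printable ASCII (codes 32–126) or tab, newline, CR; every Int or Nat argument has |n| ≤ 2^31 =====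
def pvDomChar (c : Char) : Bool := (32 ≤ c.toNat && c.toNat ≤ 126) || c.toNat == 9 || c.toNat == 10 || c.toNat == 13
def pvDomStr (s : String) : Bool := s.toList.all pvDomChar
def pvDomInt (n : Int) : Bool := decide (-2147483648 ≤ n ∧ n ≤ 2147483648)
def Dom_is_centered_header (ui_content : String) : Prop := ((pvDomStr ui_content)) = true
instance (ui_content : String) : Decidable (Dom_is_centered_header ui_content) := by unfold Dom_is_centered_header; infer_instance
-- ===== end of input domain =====

-- B precomputes the indices of 'text-center' lines once and answers each marker line
-- with an integer window check, instead of joining and re-scanning a context string per marker.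

-- ===== PORT A =====
-- split('\n') has a non-empty literal separator, so Python never raises: Chars.splitOn is exact here.
def is_centered_header (ui_content : String) : Bool :=
  let lines := PySem.Chars.splitOn ui_content.toList ['\n']
  (PySem.List.enumerate lines).any (fun il =>
    if PySem.Chars.isIn "personalInfo.fullName".toList il.2 then
      let context := PySem.Chars.join ['\n']
        (PySem.List.slice lines (some (max 0 (il.1 - 10))) (some (min (lines.length : Int) (il.1 + 10))))
      PySem.Chars.isIn "text-center".toList context
    else false)

-- ===== PORT B =====
def is_centered_header_alt (ui_content : String) : Bool :=
  let lines := PySem.Chars.splitOn ui_content.toList ['\n']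
  let centered := (PySem.List.enumerate lines).filterMap
    (fun jl => if PySem.Chars.isIn "text-center".toList jl.2 then some jl.1 else none)
  (PySem.List.enumerate lines).any (fun il =>
    PySem.Chars.isIn "personalInfo.fullName".toList il.2 &&
    centered.any (fun j => decide (il.1 - 10 ≤ j) && decide (j < il.1 + 10)))

-- ===== PRECONDITION & SPEC =====
def Spec_is_centered_header (ui_content : String) (out : Bool) : Prop := out = is_centered_header_alt ui_content
instance (ui_content : String) (out : Bool) : Decidable (Spec_is_centered_header ui_content out) := by unfold Spec_is_centered_header; infer_instance

-- ===== CLAIM (what is proved, stated in full; the proofs are below) =====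
def Claim_equal_is_centered_header : Prop := ∀ (ui_content : String), Dom_is_centered_header ui_content → Spec_is_centered_header ui_content (is_centered_header ui_content)

-- ===== LEMMAS AND PROOFS =====
lemma go_no_sep (c : Char) : ∀ (fuel : Nat) (l cur : List Char) (acc : List (List Char)),
    l.length ≤ fuel → (∀ p ∈ acc, c ∉ p) → c ∉ cur →
    ∀ p ∈ PySem.Chars.splitOn.go [c] fuel l cur acc, c ∉ p := by
  intro fuel
  induction fuel with
  | zero =>
    intro l cur acc hl hacc hcur p hp
    have hl0 : l = [] := by simpa using List.eq_nil_of_length_eq_zero (Nat.le_zero.mp hl)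
    subst hl0
    rw [PySem.Chars.splitOn.go] at hp
    simp at hp
    rcases hp with h | h
    · exact hacc p h
    · subst h; simpa using hcur
  | succ n ih =>
    intro l cur acc hl hacc hcur p hp
    cases l with
    | nil =>
      rw [PySem.Chars.splitOn.go] at hp
      case x_5 => omega
      simp at hp
      rcases hp with h | h
      · exact hacc p h
      · subst h; simpa using hcur
    | cons c' rest =>
      rw [PySem.Chars.splitOn.go] at hp
      by_cases hpre : [c].isPrefixOf (c' :: rest) = true
      · rw [if_pos hpre] at hp
        have : c = c' := by simpa [List.isPrefixOf] using hpre
        refine ih (List.drop [c].length (c' :: rest)) [] (cur.reverse :: acc) ?_ ?_ ?_ p ?_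
        · simp at hl ⊢; omega
        · intro q hq
          rcases List.mem_cons.mp hq with h | h
          · subst h; simpa using hcur
          · exact hacc q h
        · simp
        · exact hp
      · rw [if_neg hpre] at hp
        have hne : c ≠ c' := by
          intro h; subst h; simp [List.isPrefixOf] at hpre
        refine ih rest (c' :: cur) acc (by simp at hl ⊢; omega) hacc ?_ p hp
        simp [hne, hcur]

lemma splitOn_no_sep (c : Char) (s : List Char) :
    ∀ p ∈ PySem.Chars.splitOn s [c], c ∉ p := by
  intro p hp
  exact go_no_sep c (s.length + 1) s [] [] (by omega) (by simp) (by simp) p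
    (by simpa [PySem.Chars.splitOn] using hp)

lemma prefix_append_sep {sub x t : List Char} {c : Char} (hc : c ∉ sub)
    (h : sub <+: x ++ c :: t) : sub <+: x := by
  by_cases hlen : sub.length ≤ x.length
  · have heq : sub = (x ++ c :: t).take sub.length := (List.prefix_iff_eq_take.mp h)
    rw [List.take_append_of_le_length hlen] at heq
    exact heq ▸ List.take_prefix _ _
  · exfalso
    apply hc
    have hx : x.length < sub.length := Nat.lt_of_not_le hlen
    have hlt : x.length < (x ++ c :: t).length := by simp
    have := h.getElem (i := x.length) hx
    rw [List.getElem_append_right (by omega)] at this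
    simp at this
    exact this ▸ List.getElem_mem hx

lemma infix_append_sep {sub : List Char} {c : Char} (hne : sub ≠ []) (hc : c ∉ sub) :
    ∀ {x : List Char}, c ∉ x → ∀ {t : List Char},
    (sub <:+: x ++ c :: t ↔ sub <:+: x ∨ sub <:+: t) := by
  intro x
  induction x with
  | nil =>
    intro _ t
    simp only [List.nil_append]
    rw [List.infix_cons_iff]
    constructor
    · rintro (h | h)
      · exfalso; apply hc
        rcases sub with _ | ⟨a, s⟩
        · exact absurd rfl hne
        · have := h.getElem (i := 0) (by simp)
          simp at this
          simp [this]
      · exact Or.inr h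
    · rintro (h | h)
      · exact absurd (List.eq_nil_of_infix_nil h) hne
      · exact Or.inr h
  | cons c' x' ih =>
    intro hcx t
    have hc' : c ≠ c' := fun h => hcx (h ▸ List.mem_cons_self ..)
    have hcx' : c ∉ x' := fun h => hcx (List.mem_cons_of_mem _ h)
    constructor
    · intro h
      rw [List.cons_append, List.infix_cons_iff] at h
      rcases h with h | h
      · left
        rw [← List.cons_append] at h
        exact (prefix_append_sep hc h).isInfix
      · rcases (ih hcx').mp h with h | h
        · exact Or.inl (h.trans (List.suffix_cons c' x').isInfix)
        · exact Or.inr h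
    · rintro (h | h)
      · exact h.trans ((List.prefix_append _ _).isInfix)
      · rw [List.cons_append, List.infix_cons_iff]
        exact Or.inr ((ih hcx').mpr (Or.inr h))

lemma isIn_join_iff {sub : List Char} {c : Char} (hne : sub ≠ []) (hc : c ∉ sub) :
    ∀ (parts : List (List Char)), (∀ p ∈ parts, c ∉ p) →
    (PySem.Chars.isIn sub (PySem.Chars.join [c] parts) = true ↔ ∃ p ∈ parts, sub <:+: p) := by
  intro parts
  induction parts with
  | nil =>
    intro _
    rw [PySem.Chars.isIn_iff_infix, PySem.Chars.join_nil]
    exact ⟨fun h => absurd (List.eq_nil_of_infix_nil h) hne, by rintro ⟨p, hp, _⟩; simp at hp⟩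
  | cons p rest ih =>
    intro hparts
    rcases rest with _ | ⟨q, rest'⟩
    · rw [PySem.Chars.isIn_iff_infix, PySem.Chars.join_singleton]
      simp
    · rw [PySem.Chars.isIn_iff_infix, PySem.Chars.join_cons_cons]
      have hp : c ∉ p := hparts p (by simp)
      have hrest : ∀ r ∈ q :: rest', c ∉ r := fun r hr => hparts r (List.mem_cons_of_mem _ hr)
      rw [List.append_assoc, List.singleton_append]
      rw [infix_append_sep hne hc hp]
      rw [(PySem.Chars.isIn_iff_infix sub _).symm.trans (ih hrest)]
      simp

lemma mem_window_iff {α : Type} (xs : List α) (a m : Nat) (p : α) :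
    p ∈ (xs.drop a).take m ↔ ∃ k, a ≤ k ∧ k < a + m ∧ ∃ h : k < xs.length, xs[k] = p := by
  rw [List.mem_iff_getElem]
  constructor
  · rintro ⟨i, hi, hget⟩
    have hlen : i < m ∧ a + i < xs.length := by
      simp [List.length_take, List.length_drop] at hi; omega
    refine ⟨a + i, by omega, by omega, hlen.2, ?_⟩
    rw [List.getElem_take, List.getElem_drop] at hget
    exact hget
  · rintro ⟨k, hak, hkm, hk, hget⟩
    refine ⟨k - a, by simp [List.length_take, List.length_drop]; omega, ?_⟩
    rw [List.getElem_take, List.getElem_drop]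
    have : a + (k - a) = k := by omega
    simp_rw [this]
    exact hget

def HasPair (lines : List (List Char)) : Prop :=
  ∃ k, ∃ _ : k < lines.length, ∃ j, ∃ _ : j < lines.length,
    PySem.Chars.isIn "personalInfo.fullName".toList lines[k] = true ∧
    PySem.Chars.isIn "text-center".toList lines[j] = true ∧
    (k : Int) - 10 ≤ (j : Int) ∧ (j : Int) < (k : Int) + 10

lemma window_iff (lines : List (List Char)) (hnl : ∀ p ∈ lines, '\n' ∉ p) (k : Nat) :
    (PySem.Chars.isIn "text-center".toList (PySem.Chars.join ['\n']
      (PySem.List.slice lines (some (max 0 ((k : Int) - 10))) (some (min (lines.length : Int) ((k : Int) + 10))))) = true)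
    ↔ ∃ j, ∃ _ : j < lines.length, PySem.Chars.isIn "text-center".toList lines[j] = true ∧
        (k : Int) - 10 ≤ (j : Int) ∧ (j : Int) < (k : Int) + 10 := by
  have h0a : (0 : Int) ≤ max 0 ((k : Int) - 10) := le_max_left _ _
  have h0b : (0 : Int) ≤ min (lines.length : Int) ((k : Int) + 10) :=
    le_min (by positivity) (by positivity)
  rw [PySem.List.slice_toNat lines h0a h0b]
  rw [isIn_join_iff (by decide) (by decide) _
    (fun p hp => hnl p (List.mem_of_mem_drop (List.mem_of_mem_take hp)))]
  constructor
  · rintro ⟨p, hp, hsub⟩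
    rcases (mem_window_iff lines _ _ p).mp hp with ⟨j, hj1, hj2, hjn, rfl⟩
    exact ⟨j, hjn, (PySem.Chars.isIn_iff_infix _ _).mpr hsub, by omega, by omega⟩
  · rintro ⟨j, hjn, htc, h1, h2⟩
    exact ⟨lines[j], (mem_window_iff lines _ _ _).mpr ⟨j, by omega, by omega, hjn, rfl⟩,
      (PySem.Chars.isIn_iff_infix _ _).mp htc⟩

lemma A_iff (ui_content : String) :
    is_centered_header ui_content = true ↔ HasPair (PySem.Chars.splitOn ui_content.toList ['\n']) := by
  unfold is_centered_header
  set lines := PySem.Chars.splitOn ui_content.toList ['\n'] with hlines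
  have hnl : ∀ p ∈ lines, '\n' ∉ p := splitOn_no_sep '\n' ui_content.toList
  rw [List.any_eq_true]
  constructor
  · rintro ⟨il, hmem, hpred⟩
    rcases (PySem.List.mem_enumerate_iff lines 0 il).mp hmem with ⟨k, hk, rfl⟩
    simp only [zero_add] at hpred
    split_ifs at hpred with hfn
    · rcases (window_iff lines hnl k).mp hpred with ⟨j, hjn, htc, h1, h2⟩
      exact ⟨k, hk, j, hjn, hfn, htc, h1, h2⟩
  · rintro ⟨k, hk, j, hjn, hfn, htc, h1, h2⟩
    refine ⟨((k : Int), lines[k]), (PySem.List.mem_enumerate_iff lines 0 _).mpr ⟨k, hk, by simp⟩, ?_⟩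
    simp only [hfn, if_true]
    exact (window_iff lines hnl k).mpr ⟨j, hjn, htc, h1, h2⟩

lemma B_iff (ui_content : String) :
    is_centered_header_alt ui_content = true ↔ HasPair (PySem.Chars.splitOn ui_content.toList ['\n']) := by
  unfold is_centered_header_alt
  set lines := PySem.Chars.splitOn ui_content.toList ['\n'] with hlines
  rw [List.any_eq_true]
  constructor
  · rintro ⟨il, hmem, hpred⟩
    rcases (PySem.List.mem_enumerate_iff lines 0 il).mp hmem with ⟨k, hk, rfl⟩
    simp only [zero_add, Bool.and_eq_true, List.any_eq_true] at hpred
    rcases hpred with ⟨hfn, j, hjmem, hw⟩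
    rcases List.mem_filterMap.mp hjmem with ⟨jl, hjl, hsome⟩
    rcases (PySem.List.mem_enumerate_iff lines 0 jl).mp hjl with ⟨j', hj', rfl⟩
    split_ifs at hsome with htc
    · simp only [Option.some.injEq] at hsome
      subst hsome
      simp only [zero_add, decide_eq_true_eq] at hw
      exact ⟨k, hk, j', hj', hfn, htc, hw.1, hw.2⟩
  · rintro ⟨k, hk, j, hjn, hfn, htc, h1, h2⟩
    refine ⟨((k : Int), lines[k]), (PySem.List.mem_enumerate_iff lines 0 _).mpr ⟨k, hk, by simp⟩, ?_⟩
    simp only [Bool.and_eq_true, List.any_eq_true]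
    refine ⟨hfn, (j : Int), List.mem_filterMap.mpr ⟨((j : Int), lines[j]),
      (PySem.List.mem_enumerate_iff lines 0 _).mpr ⟨j, hjn, by simp⟩, by rw [if_pos htc]⟩, ?_⟩
    simp only [decide_eq_true_eq]
    exact ⟨h1, h2⟩


-- ===== VERDICT (by name: the statement is the Claim_ definition above) =====
theorem is_centered_header_spec : Claim_equal_is_centered_header := by
  intro ui_content _
  unfold Spec_is_centered_header
  rw [Bool.eq_iff_iff, A_iff, B_iff]
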